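-- pv_equiv track=rewrite | github.com/Zudjo/SQ-Reporter | libs/json_handler.py | count_properties_per_mltpl_groups
-- ===== SOURCE A (Python) =====
-- def count_properties_per_group(json, group_name, info_dict):
--     properties = info_dict[group_name].keys()
--
--     # Initialization of values
--     values = {}
--     for property in properties:
--         values.update({property: 0})
--
--     # Counting
--     for node in json:
--         try:
--             if (group_name == "type" or group_name == "severity") and (node["status"] == "CLOSED" or node["status"] == "RESOLVED"):
--                 pass
--             else:
--                 values[node[group_name]] += 1
--         except KeyError:
--             pass
--     return values
--
-- def count_properties_per_mltpl_groups(json, info_dict):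
--     groups_names = info_dict.keys()
--     values = []
--
--     for group_name in groups_names:
--         properties_quantities = count_properties_per_group(json, group_name, info_dict)
--
--         values_group = {}
--         for property in info_dict[group_name]:
--             values_group.update({property: 0})
--
--         for property in properties_quantities:
--             updated = {property: values_group[property] + properties_quantities[property]}
--             values_group.update(updated)
--         values.append(values_group)
--     return values
-- ===== SOURCE B (Python) =====
-- def count_properties_per_mltpl_groups(json, info_dict):
--     # Declarative per-property counting: for each property, count the matching
--     # nodes directly; no mutable counter dicts at all.
--     return [
--         {p: sum(1 for node in json if _eligible(node, g) and node.get(g) == p)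
--          for p in info_dict[g]}
--         for g in info_dict
--     ]
--
--
-- def _eligible(node, g):
--     # For 'type'/'severity' groups a node counts only if it has a status that
--     # is neither CLOSED nor RESOLVED (matching A's KeyError-on-missing-status).
--     if g in ("type", "severity"):
--         s = node.get("status")
--         return s is not None and s not in ("CLOSED", "RESOLVED")
--     return True
-- ===== Notes on version B (the rewrite author's own statement) =====
-- stated objective: alternative
-- what changed: Replaced A's mutating counter dicts (zero-init per group, one scan per group incrementing via try/except, then a merge pass) by a direct declarative formulation: for each group and each of its properties, count the nodes that are eligible and carry that property value; no mutable dict state at all.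
import Mathlib
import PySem

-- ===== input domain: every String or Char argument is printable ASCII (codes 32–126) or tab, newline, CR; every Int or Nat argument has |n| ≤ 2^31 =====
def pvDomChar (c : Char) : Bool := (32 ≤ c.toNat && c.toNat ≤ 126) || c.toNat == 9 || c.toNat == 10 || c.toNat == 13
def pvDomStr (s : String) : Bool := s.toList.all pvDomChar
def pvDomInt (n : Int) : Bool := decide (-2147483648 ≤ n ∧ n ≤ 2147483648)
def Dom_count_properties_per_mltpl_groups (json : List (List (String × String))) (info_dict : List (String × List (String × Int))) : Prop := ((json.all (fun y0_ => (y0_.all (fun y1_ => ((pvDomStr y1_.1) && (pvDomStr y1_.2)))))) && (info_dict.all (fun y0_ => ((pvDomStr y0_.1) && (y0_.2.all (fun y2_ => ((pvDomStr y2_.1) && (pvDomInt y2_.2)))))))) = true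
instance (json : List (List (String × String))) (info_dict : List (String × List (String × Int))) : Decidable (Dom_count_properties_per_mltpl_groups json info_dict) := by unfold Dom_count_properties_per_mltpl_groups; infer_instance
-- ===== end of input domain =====

-- ===== PORT A =====
-- B replaces A's mutating counter dicts by a declarative per-property count of matching nodes (alternative decomposition, same results).
-- Python dict arguments arrive as association lists; each port rebuilds them with PySem.Dict.ofList (insertion order, last value wins).

-- values[node[group_name]] += 1 inside try/except KeyError: both the node lookup and the counter lookup may raise.
def pvIncrA (values : PySem.Dict String Int) (nd : PySem.Dict String String) (g : String) : PySem.Dict String Int :=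
  match nd.get? g with
  | none => values                       -- KeyError on node[group_name]
  | some v =>
    match values.get? v with
    | none => values                     -- KeyError on values[...]
    | some c => values.insert v (c + 1)

-- literal port of count_properties_per_group
def pvCountPerGroup (json : List (List (String × String))) (g : String) (info_dict : List (String × List (String × Int))) : PySem.Dict String Int :=
  let properties := (PySem.Dict.ofList ((PySem.Dict.ofList info_dict).getD g [])).keys
  let values := properties.foldl (fun d p => d.insert p (0 : Int)) PySem.Dict.empty
  json.foldl (fun values node =>
    let nd := PySem.Dict.ofList node
    if g == "type" || g == "severity" then
      match nd.get? "status" with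
      | none => values                   -- KeyError on node["status"]
      | some st =>
        if st == "CLOSED" || st == "RESOLVED" then values
        else pvIncrA values nd g
    else pvIncrA values nd g) values

def count_properties_per_mltpl_groups (json : List (List (String × String))) (info_dict : List (String × List (String × Int))) : List (List (String × Int)) :=
  let D := PySem.Dict.ofList info_dict
  (D.keys.map (fun g =>
    let pq := pvCountPerGroup json g info_dict
    let vg := (PySem.Dict.ofList (D.getD g [])).keys.foldl (fun d p => d.insert p (0 : Int)) PySem.Dict.empty
    -- both lookups below are at keys that are present, so getD equals Python's __getitem__
    let vg2 := pq.keys.foldl (fun vg p => vg.insert p (vg.getD p 0 + pq.getD p 0)) vg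
    vg2.items))

-- ===== PORT B =====
-- _eligible: node.get("status") returning None (no "status" key) makes the node ineligible for type/severity groups
def pvEligible (node : List (String × String)) (g : String) : Bool :=
  if g == "type" || g == "severity" then
    match (PySem.Dict.ofList node).get? "status" with
    | none => false
    | some s => !(s == "CLOSED" || s == "RESOLVED")
  else true

-- sum(1 for node in json if …) is ported as List.countP (cast to Int)
def count_properties_per_mltpl_groups_alt (json : List (List (String × String))) (info_dict : List (String × List (String × Int))) : List (List (String × Int)) :=
  let D := PySem.Dict.ofList info_dict
  D.keys.map (fun g =>
    (PySem.Dict.ofList (D.getD g [])).keys.map (fun p =>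
      (p, ((json.countP (fun node => pvEligible node g && ((PySem.Dict.ofList node).get? g == some p))) : Int))))

-- ===== PRECONDITION & SPEC =====
def Spec_count_properties_per_mltpl_groups (json : List (List (String × String))) (info_dict : List (String × List (String × Int))) (out : List (List (String × Int))) : Prop := out = count_properties_per_mltpl_groups_alt json info_dict
instance (json : List (List (String × String))) (info_dict : List (String × List (String × Int))) (out : List (List (String × Int))) : Decidable (Spec_count_properties_per_mltpl_groups json info_dict out) := by unfold Spec_count_properties_per_mltpl_groups; infer_instance

-- ===== CLAIM (what is proved, stated in full; the proofs are below) =====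
def Claim_equal_count_properties_per_mltpl_groups : Prop := ∀ (json : List (List (String × String))) (info_dict : List (String × List (String × Int))), Dom_count_properties_per_mltpl_groups json info_dict → Spec_count_properties_per_mltpl_groups json info_dict (count_properties_per_mltpl_groups json info_dict)

-- ===== LEMMAS AND PROOFS =====

-- proof-side restatement of A's per-node, per-group update (definitionally equal to the fold body in pvCountPerGroup)
def pvStepB (node : List (String × String)) (g : String) (c : PySem.Dict String Int) : PySem.Dict String Int :=
  let nd := PySem.Dict.ofList node
  if g == "type" || g == "severity" then
    match nd.get? "status" with
    | none => c
    | some st =>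
      if st == "CLOSED" || st == "RESOLVED" then c
      else pvIncrA c nd g
  else pvIncrA c nd g

theorem pv_incrA_keys (nd : PySem.Dict String String) (g : String) (c : PySem.Dict String Int) :
  (pvIncrA c nd g).keys = c.keys := by
  unfold pvIncrA
  cases h1 : nd.get? g with
  | none => rfl
  | some v =>
    show (match c.get? v with | none => c | some k => c.insert v (k + 1)).keys = c.keys
    cases h2 : c.get? v with
    | none => rfl
    | some k =>
      show (c.insert v (k + 1)).keys = c.keys
      exact PySem.Dict.keys_insert_of_contains _ _
        (by rw [PySem.Dict.contains_eq_isSome_get?, h2]; rfl)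

theorem pv_stepB_keys (n : List (String × String)) (g : String) (c : PySem.Dict String Int) :
  (pvStepB n g c).keys = c.keys := by
  unfold pvStepB
  by_cases h : (g == "type" || g == "severity") = true
  · simp only [h, if_true]
    cases (PySem.Dict.ofList n).get? "status" with
    | none => rfl
    | some st =>
      by_cases h2 : (st == "CLOSED" || st == "RESOLVED") = true
      · simp [h2]
      · simp only [h2]; exact pv_incrA_keys _ _ _
  · simp only [h]; exact pv_incrA_keys _ _ _

theorem pv_incrA_getD (n : List (String × String)) (g : String) (c : PySem.Dict String Int)
    (p : String) (hp : c.contains p = true) :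
  (pvIncrA c (PySem.Dict.ofList n) g).getD p 0
    = c.getD p 0 + (if ((PySem.Dict.ofList n).get? g == some p) then 1 else 0) := by
  unfold pvIncrA
  cases h1 : (PySem.Dict.ofList n).get? g with
  | none => simp
  | some v =>
    show (match c.get? v with | none => c | some k => c.insert v (k + 1)).getD p 0 = _
    by_cases hv : p = v
    · subst hv
      cases h2 : c.get? p with
      | none =>
        rw [PySem.Dict.contains_eq_isSome_get?, h2] at hp; simp at hp
      | some k =>
        have : c.getD p 0 = k := by simp [PySem.Dict.getD, h2]
        simp [this]
    · have hb : ((some v == some p) : Bool) = false := by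
        rw [beq_eq_false_iff_ne]
        exact fun e => hv (Option.some_inj.mp e).symm
      cases h2 : c.get? v with
      | none => simp [hb]
      | some k => simp [PySem.Dict.getD_insert, hv, hb]

theorem pv_stepB_getD (n : List (String × String)) (g : String) (c : PySem.Dict String Int)
    (p : String) (hp : c.contains p = true) :
  (pvStepB n g c).getD p 0
    = c.getD p 0 + (if pvEligible n g && ((PySem.Dict.ofList n).get? g == some p) then 1 else 0) := by
  unfold pvStepB pvEligible
  by_cases h : (g == "type" || g == "severity") = true
  · simp only [h, if_true]
    cases (PySem.Dict.ofList n).get? "status" with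
    | none => simp
    | some st =>
      by_cases h2 : (st == "CLOSED" || st == "RESOLVED") = true
      · simp [h2]
      · simp only [h2, Bool.false_eq_true, if_false, Bool.not_false]
        rw [pv_incrA_getD n g c p hp]
        simp
  · simp only [h, Bool.false_eq_true, if_false]
    rw [pv_incrA_getD n g c p hp]
    simp

theorem pv_fold_getD (json : List (List (String × String))) (g : String) (p : String) :
  ∀ (c : PySem.Dict String Int), c.contains p = true →
  (json.foldl (fun c n => pvStepB n g c) c).getD p 0
    = c.getD p 0
      + ((json.countP (fun n => pvEligible n g && ((PySem.Dict.ofList n).get? g == some p))) : Int) := by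
  induction json with
  | nil => intro c _; simp
  | cons n rest ih =>
    intro c hc
    have hc' : (pvStepB n g c).contains p = true := by
      rw [PySem.Dict.contains_eq_decide_mem_keys, pv_stepB_keys,
        ← PySem.Dict.contains_eq_decide_mem_keys]; exact hc
    rw [List.foldl_cons, ih _ hc', pv_stepB_getD n g c p hc, List.countP_cons]
    push_cast
    split_ifs <;> ring

theorem pv_foldl_stepB_keys (json : List (List (String × String))) (g : String)
    (c0 : PySem.Dict String Int) :
  (json.foldl (fun c n => pvStepB n g c) c0).keys = c0.keys := by
  induction json generalizing c0 with
  | nil => rfl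
  | cons n rest ih => rw [List.foldl_cons, ih, pv_stepB_keys]

theorem pv_map_fst_pair (K : List String) :
  List.map ((fun x : String × Int => x.1) ∘ fun p => (p, (0 : Int))) K = K := by
  induction K with
  | nil => rfl
  | cons a t ih => simp only [List.map_cons, ih, Function.comp]

theorem pv_init_items (K : List String) (h : K.Nodup) :
  (K.foldl (fun d p => d.insert p (0 : Int)) PySem.Dict.empty).items
    = K.map (fun p => (p, (0 : Int))) := by
  have := PySem.Dict.items_foldl_insert_fresh (l := K) (k := fun p => p)
      (v := fun _ => (0 : Int)) (d := PySem.Dict.empty) (by simp) (by simpa using h)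
  simpa using this

theorem pv_merge_items (q : PySem.Dict String Int) (ks : List String) :
  ∀ (v : PySem.Dict String Int), ks.Nodup →
  (∀ p ∈ ks, v.contains p = true) → (∀ p ∈ ks, v.getD p 0 = 0) →
  (ks.foldl (fun v p => v.insert p (v.getD p 0 + q.getD p 0)) v).items
  = v.items.map (fun pr => if pr.1 ∈ ks then (pr.1, q.getD pr.1 0) else pr) := by
  induction ks with
  | nil => intro v _ _ _; simp
  | cons p t ih =>
    intro v hnd hc h0
    have hpt : p ∉ t := (List.nodup_cons.mp hnd).1
    simp only [List.foldl_cons]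
    rw [h0 p (by simp), zero_add]
    rw [ih (v.insert p (q.getD p 0)) (List.nodup_cons.mp hnd).2
      (by intro p' hp'
          rw [PySem.Dict.contains_insert]
          rw [hc p' (List.mem_cons_of_mem _ hp')]
          simp)
      (by intro p' hp'
          have hne : p' ≠ p := fun e => hpt (e ▸ hp')
          rw [PySem.Dict.getD_insert]
          simp only [hne, if_false]
          exact h0 p' (List.mem_cons_of_mem _ hp'))]
    rw [PySem.Dict.items_insert_of_contains _ _ (hc p (by simp)), List.map_map]
    congr 1
    funext pr
    by_cases hp : pr.1 = p
    · simp [Function.comp, hp, hpt]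
    · simp [Function.comp, hp, List.mem_cons]

-- A's whole per-group output equals B's per-group list
theorem pv_group (json : List (List (String × String))) (L : List (String × Int)) (g : String)
    (pq : PySem.Dict String Int)
    (hpq : pq = json.foldl (fun c n => pvStepB n g c)
      ((PySem.Dict.ofList L).keys.foldl (fun d p => d.insert p (0 : Int)) PySem.Dict.empty)) :
  (pq.keys.foldl (fun vg p => vg.insert p (vg.getD p 0 + pq.getD p 0))
      ((PySem.Dict.ofList L).keys.foldl (fun d p => d.insert p (0 : Int)) PySem.Dict.empty)).items
  = (PySem.Dict.ofList L).keys.map (fun p =>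
      (p, ((json.countP (fun n => pvEligible n g && ((PySem.Dict.ofList n).get? g == some p))) : Int))) := by
  set K := (PySem.Dict.ofList L).keys with hKdef
  have hK : K.Nodup := PySem.Dict.nodup_keys_ofList L
  set init := K.foldl (fun d p => d.insert p (0 : Int)) PySem.Dict.empty with hinitdef
  have hinit_items : init.items = K.map (fun p => (p, (0 : Int))) := pv_init_items K hK
  have hinit_keys : init.keys = K := by
    simp only [PySem.Dict.keys, hinit_items, List.map_map]
    exact pv_map_fst_pair K
  have hpqk : pq.keys = K := by
    rw [hpq, pv_foldl_stepB_keys, hinit_keys]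
  have hc : ∀ p ∈ K, init.contains p = true := by
    intro p hp; rw [PySem.Dict.contains_iff_mem_keys, hinit_keys]; exact hp
  have h0 : ∀ p ∈ K, init.getD p 0 = 0 := by
    intro p hp
    exact PySem.Dict.getD_of_mem_items init (by rw [hinit_items]; exact List.mem_map_of_mem hp)
      (by rw [hinit_keys]; exact hK) 0
  rw [hpqk, pv_merge_items pq K init hK hc h0, hinit_items, List.map_map]
  apply List.map_congr_left
  intro p hp
  have hgd : pq.getD p 0
      = ((json.countP (fun n => pvEligible n g && ((PySem.Dict.ofList n).get? g == some p))) : Int) := by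
    rw [hpq, pv_fold_getD json g p init (hc p hp), h0 p hp, zero_add]
  simp [Function.comp, hp, hgd]

-- ===== VERDICT (by name: the statement is the Claim_ definition above) =====
theorem count_properties_per_mltpl_groups_spec : Claim_equal_count_properties_per_mltpl_groups := by
  intro json info_dict _
  unfold Spec_count_properties_per_mltpl_groups
  show (PySem.Dict.ofList info_dict).keys.map (fun g =>
        ((pvCountPerGroup json g info_dict).keys.foldl
          (fun vg p => vg.insert p (vg.getD p 0 + (pvCountPerGroup json g info_dict).getD p 0))
          ((PySem.Dict.ofList ((PySem.Dict.ofList info_dict).getD g [])).keys.foldl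
            (fun d p => d.insert p (0 : Int)) PySem.Dict.empty)).items)
    = _
  apply List.map_congr_left
  intro g hg
  exact pv_group json ((PySem.Dict.ofList info_dict).getD g []) g (pvCountPerGroup json g info_dict) rfl
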